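-- pv_equiv track=rewrite | github.com/pypi-data/pypi-mirror-85 | packages/snamosim/snamosim-0.3.1.tar.gz/snamosim-0.3.1/src/utils/utils.py | get_set_neighbors
-- ===== SOURCE A (Python) =====
-- TAXI_NEIGHBORHOOD = ((0, 1), (0, -1), (1, 0), (-1, 0))
--
-- def get_neighbors(cell, width, height, neighborhood=TAXI_NEIGHBORHOOD):
--     neighbors = set()
--     for i, j in neighborhood:
--         neighbor = cell[0] + i, cell[1] + j
--         if is_in_matrix(neighbor, width, height):
--             neighbors.add(neighbor)
--     return neighbors
--
-- def get_set_neighbors(cell_set, width, height, neighborhood=TAXI_NEIGHBORHOOD, previous_cell_set=None):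
--     neighbor_set = set()
--     for cell in cell_set:
--         neighbor_set.update(get_neighbors(cell, width, height, neighborhood))
--     neighbor_set.difference_update(cell_set)
--     if previous_cell_set is not None:
--         neighbor_set.difference_update(previous_cell_set)
--     return neighbor_set
--
-- def is_in_matrix(cell, width, height):
--     return 0 <= cell[0] < width and 0 <= cell[1] < height
-- ===== SOURCE B (Python) =====
-- TAXI_NEIGHBORHOOD = ((0, 1), (0, -1), (1, 0), (-1, 0))
--
--
-- def get_set_neighbors(cell_set, width, height, neighborhood=TAXI_NEIGHBORHOOD, previous_cell_set=None):
--     excluded = set(cell_set)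
--     if previous_cell_set is not None:
--         excluded.update(previous_cell_set)
--
--     cells = list(cell_set)
--
--     def expand(chunk):
--         # divide and conquer: the neighbor set of a chunk of cells is the
--         # union of the neighbor sets of its two halves
--         if len(chunk) == 0:
--             return set()
--         if len(chunk) == 1:
--             x, y = chunk[0]
--             return {(x + i, y + j) for i, j in neighborhood
--                     if 0 <= x + i < width and 0 <= y + j < height
--                     and (x + i, y + j) not in excluded}
--         mid = len(chunk) // 2
--         return expand(chunk[:mid]) | expand(chunk[mid:])
--
--     return expand(cells)
-- ===== Notes on version B (the rewrite author's own statement) =====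
-- stated objective: alternative
-- what changed: Replaced A's accumulate-then-subtract loop by a divide-and-conquer recursion: the cell list is split in halves, each half's already-filtered neighbor set is computed recursively (membership in a precomputed excluded set replaces both difference_update passes), and the halves are combined with set union.
import Mathlib
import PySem

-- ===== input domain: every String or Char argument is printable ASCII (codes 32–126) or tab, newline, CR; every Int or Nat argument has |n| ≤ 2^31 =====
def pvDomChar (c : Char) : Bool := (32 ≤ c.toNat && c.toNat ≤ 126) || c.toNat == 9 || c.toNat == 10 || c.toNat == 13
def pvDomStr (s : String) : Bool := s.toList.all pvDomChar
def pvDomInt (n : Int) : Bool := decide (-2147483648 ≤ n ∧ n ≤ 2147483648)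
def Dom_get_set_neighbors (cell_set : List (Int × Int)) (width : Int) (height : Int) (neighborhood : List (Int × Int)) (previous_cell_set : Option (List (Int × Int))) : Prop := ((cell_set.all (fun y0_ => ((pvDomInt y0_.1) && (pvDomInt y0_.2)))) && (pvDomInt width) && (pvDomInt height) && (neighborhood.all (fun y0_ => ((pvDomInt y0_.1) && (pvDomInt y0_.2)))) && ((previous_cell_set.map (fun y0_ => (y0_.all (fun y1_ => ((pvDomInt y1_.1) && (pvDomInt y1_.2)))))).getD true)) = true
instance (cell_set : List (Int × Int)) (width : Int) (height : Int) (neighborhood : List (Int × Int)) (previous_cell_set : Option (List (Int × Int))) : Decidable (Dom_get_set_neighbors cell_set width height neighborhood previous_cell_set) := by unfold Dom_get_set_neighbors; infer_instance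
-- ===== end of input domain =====

-- B replaces A's accumulate-then-subtract loop by a divide-and-conquer recursion over the cell list,
-- filtering against one precomputed excluded set and combining halves with set union (alternative decomposition);
-- both programs return a Python set, so the equivalence is about its elements (here in first-insertion order).

-- ===== PORT A =====
def is_in_matrix (cell : Int × Int) (width : Int) (height : Int) : Bool :=
  decide (0 ≤ cell.1 ∧ cell.1 < width) && decide (0 ≤ cell.2 ∧ cell.2 < height)

def get_neighbors (cell : Int × Int) (width : Int) (height : Int) (neighborhood : List (Int × Int)) : PySem.Set (Int × Int) :=
  neighborhood.foldl (fun neighbors ij =>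
    let neighbor := (cell.1 + ij.1, cell.2 + ij.2)
    if is_in_matrix neighbor width height then PySem.Set.add neighbors neighbor else neighbors)
    PySem.Set.empty

def get_set_neighbors (cell_set : List (Int × Int)) (width : Int) (height : Int) (neighborhood : List (Int × Int)) (previous_cell_set : Option (List (Int × Int))) : List (Int × Int) :=
  let neighbor_set : PySem.Set (Int × Int) :=
    cell_set.foldl (fun s cell => PySem.Set.update s (get_neighbors cell width height neighborhood)) PySem.Set.empty
  let neighbor_set := PySem.Set.diff neighbor_set cell_set
  match previous_cell_set with
  | some prev => PySem.Set.diff neighbor_set prev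
  | none => neighbor_set

-- ===== PORT B =====
-- the inner recursive helper 'expand' of Source B; chunk[:mid]/chunk[mid:] with 0 ≤ mid ≤ len are
-- exactly List.take/List.drop, and len(chunk)//2 on the nonneg length is exactly Nat division
def pvExpand (width : Int) (height : Int) (neighborhood : List (Int × Int)) (excluded : PySem.Set (Int × Int)) : (chunk : List (Int × Int)) → PySem.Set (Int × Int)
  | [] => PySem.Set.empty
  | [c] =>
      neighborhood.foldl (fun s ij =>
        let n := (c.1 + ij.1, c.2 + ij.2)
        if decide (0 ≤ n.1 ∧ n.1 < width) && decide (0 ≤ n.2 ∧ n.2 < height) && !excluded.contains n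
        then PySem.Set.add s n else s) PySem.Set.empty
  | c1 :: c2 :: rest =>
      let chunk := c1 :: c2 :: rest
      let mid := chunk.length / 2
      PySem.Set.union (pvExpand width height neighborhood excluded (chunk.take mid))
        (pvExpand width height neighborhood excluded (chunk.drop mid))
  termination_by chunk => chunk.length
  decreasing_by
  · simp [List.length_take]; omega
  · simp [List.length_drop]; omega

def get_set_neighbors_alt (cell_set : List (Int × Int)) (width : Int) (height : Int) (neighborhood : List (Int × Int)) (previous_cell_set : Option (List (Int × Int))) : List (Int × Int) :=
  let excluded : PySem.Set (Int × Int) :=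
    match previous_cell_set with
    | some prev => PySem.Set.update (PySem.Set.ofList cell_set) prev
    | none => PySem.Set.ofList cell_set
  pvExpand width height neighborhood excluded cell_set

-- ===== PRECONDITION & SPEC =====
def Spec_get_set_neighbors (cell_set : List (Int × Int)) (width : Int) (height : Int) (neighborhood : List (Int × Int)) (previous_cell_set : Option (List (Int × Int))) (out : List (Int × Int)) : Prop := out = get_set_neighbors_alt cell_set width height neighborhood previous_cell_set
instance (cell_set : List (Int × Int)) (width : Int) (height : Int) (neighborhood : List (Int × Int)) (previous_cell_set : Option (List (Int × Int))) (out : List (Int × Int)) : Decidable (Spec_get_set_neighbors cell_set width height neighborhood previous_cell_set out) := by unfold Spec_get_set_neighbors; infer_instance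

-- ===== CLAIM (what is proved, stated in full; the proofs are below) =====
def Claim_equal_get_set_neighbors : Prop := ∀ (cell_set : List (Int × Int)) (width : Int) (height : Int) (neighborhood : List (Int × Int)) (previous_cell_set : Option (List (Int × Int))), Dom_get_set_neighbors cell_set width height neighborhood previous_cell_set → Spec_get_set_neighbors cell_set width height neighborhood previous_cell_set (get_set_neighbors cell_set width height neighborhood previous_cell_set)

-- ===== LEMMAS AND PROOFS =====

-- the common normal form both proofs reach: a fold of adds over the filtered candidate list
def pvCands (cell_set : List (Int × Int)) (width height : Int) (neighborhood : List (Int × Int)) (pv : List (Int × Int)) : List (Int × Int) :=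
  cell_set.flatMap (fun c =>
    (neighborhood.map (fun ij => (c.1 + ij.1, c.2 + ij.2))).filter
      (fun n => is_in_matrix n width height && !decide (n ∈ cell_set) && !decide (n ∈ pv)))

-- diff past an add
theorem pv_diff_add {α : Type} [BEq α] [LawfulBEq α] (s t : List α) (x : α) :
    PySem.Set.diff (PySem.Set.add s x) t =
      if x ∈ t then PySem.Set.diff s t else PySem.Set.add (PySem.Set.diff s t) x := by
  by_cases hs : x ∈ s
  · by_cases ht : x ∈ t <;>
      simp_all [PySem.Set.add, PySem.Set.diff, PySem.Set.contains, List.mem_filter]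
  · by_cases ht : x ∈ t <;>
      simp_all [PySem.Set.add, PySem.Set.diff, PySem.Set.contains, List.filter_append,
        List.mem_filter]

-- double diff past a fold of adds becomes a filtered fold of adds
theorem pv_diff2_foldl_add {α : Type} [BEq α] [LawfulBEq α] (L : List α) (s cs pv : List α) :
    PySem.Set.diff (PySem.Set.diff (L.foldl PySem.Set.add s) cs) pv =
      (L.filter (fun n => !decide (n ∈ cs) && !decide (n ∈ pv))).foldl PySem.Set.add
        (PySem.Set.diff (PySem.Set.diff s cs) pv) := by
  induction L generalizing s with
  | nil => rfl
  | cons x L ih =>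
    simp only [List.foldl_cons, List.filter_cons]
    rw [ih]
    by_cases hcs : x ∈ cs <;> by_cases hpv : x ∈ pv <;>
      simp [pv_diff_add, hcs, hpv]

-- membership is preserved by update (both from the base set and from the update list)
theorem pv_mem_update {α : Type} [BEq α] [LawfulBEq α] (t : List α) (s : List α) (y : α)
    (h : y ∈ s ∨ y ∈ t) : y ∈ PySem.Set.update s t := by
  induction t generalizing s with
  | nil => simpa [PySem.Set.update] using h.resolve_right (by simp)
  | cons x t ih =>
    simp only [PySem.Set.update, List.foldl_cons] at *
    apply ih
    rcases h with h | h
    · left; simp only [PySem.Set.add]; split <;> simp [h]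
    · rcases List.mem_cons.mp h with rfl | h
      · left; simp only [PySem.Set.add]; split <;> simp_all [PySem.Set.contains]
      · right; exact h

-- updating with set(L) is updating with L
theorem pv_update_ofList {α : Type} [BEq α] [LawfulBEq α] (L : List α) (s : List α) :
    PySem.Set.update s (PySem.Set.ofList L) = PySem.Set.update s L := by
  suffices h : ∀ (t : List α), PySem.Set.update s (PySem.Set.update t L) =
      PySem.Set.update (PySem.Set.update s t) L by
    simpa [PySem.Set.ofList_eq_foldl, PySem.Set.update] using h []
  induction L generalizing s with
  | nil => simp [PySem.Set.update]
  | cons x L ih =>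
    intro t
    simp only [PySem.Set.update, List.foldl_cons] at *
    rw [ih]
    congr 1
    by_cases hx : x ∈ t
    · have hmem : x ∈ List.foldl PySem.Set.add s t := pv_mem_update t s x (Or.inr hx)
      simp [PySem.Set.add, PySem.Set.contains, hx, hmem]
    · simp [PySem.Set.add, PySem.Set.contains, hx, List.foldl_append]

-- a conditional-add loop over mapped elements is a fold of adds over the filtered mapped list
theorem pv_foldl_restrict {α β : Type} [BEq α] (l : List β) (f : β → α) (p : α → Bool)
    (init : PySem.Set α) :
    l.foldl (fun acc ij => if p (f ij) then PySem.Set.add acc (f ij) else acc) init =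
      ((l.map f).filter p).foldl PySem.Set.add init := by
  induction l generalizing init with
  | nil => rfl
  | cons x l ih =>
    simp only [List.foldl_cons, List.map_cons, List.filter_cons]
    by_cases hp : p (f x) <;> simp [hp, ih]

-- get_neighbors is set( [cell+ij for ij in neighborhood if in matrix] )
theorem pv_gn_eq (cell : Int × Int) (w h : Int) (nb : List (Int × Int)) :
    get_neighbors cell w h nb =
      PySem.Set.ofList
        ((nb.map (fun ij => (cell.1 + ij.1, cell.2 + ij.2))).filter
          (fun n => is_in_matrix n w h)) := by
  unfold get_neighbors
  show nb.foldl (fun neighbors ij =>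
      if is_in_matrix (cell.1 + ij.1, cell.2 + ij.2) w h
      then PySem.Set.add neighbors (cell.1 + ij.1, cell.2 + ij.2) else neighbors)
      PySem.Set.empty = _
  rw [pv_foldl_restrict nb (fun ij => (cell.1 + ij.1, cell.2 + ij.2))
    (fun n => is_in_matrix n w h)]
  rfl

-- the outer loop: double diff distributes over the per-cell updates
theorem pv_outer {α β : Type} [BEq α] [LawfulBEq α] (cells : List β) (s cs pv : List α)
    (L : β → List α) :
    PySem.Set.diff (PySem.Set.diff
        (cells.foldl (fun s c => (L c).foldl PySem.Set.add s) s) cs) pv =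
      cells.foldl
        (fun r c => ((L c).filter (fun n => !decide (n ∈ cs) && !decide (n ∈ pv))).foldl
          PySem.Set.add r)
        (PySem.Set.diff (PySem.Set.diff s cs) pv) := by
  induction cells generalizing s with
  | nil => rfl
  | cons c cells ih => rw [List.foldl_cons, List.foldl_cons, ih, pv_diff2_foldl_add]

-- a fold of per-element folds of adds is one fold over the flatMap
theorem pv_foldl_flatMap {α β : Type} [BEq α] (cells : List β) (L : β → List α)
    (s : PySem.Set α) :
    cells.foldl (fun r c => (L c).foldl PySem.Set.add r) s =
      (cells.flatMap L).foldl PySem.Set.add s := by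
  induction cells generalizing s with
  | nil => rfl
  | cons c cells ih => simp [List.flatMap_cons, List.foldl_append, ih]

-- A equals the normal form
theorem pv_A_norm (cell_set : List (Int × Int)) (w h : Int) (nb : List (Int × Int)) (pv : List (Int × Int)) :
    PySem.Set.diff (PySem.Set.diff
        (cell_set.foldl (fun s cell => PySem.Set.update s (get_neighbors cell w h nb)) PySem.Set.empty)
        cell_set) pv =
      (pvCands cell_set w h nb pv).foldl PySem.Set.add PySem.Set.empty := by
  have hA : ∀ (s : PySem.Set (Int × Int)) (cell : Int × Int),
      PySem.Set.update s (get_neighbors cell w h nb) =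
        ((nb.map (fun ij => (cell.1 + ij.1, cell.2 + ij.2))).filter
          (fun n => is_in_matrix n w h)).foldl PySem.Set.add s := by
    intro s cell
    rw [pv_gn_eq, pv_update_ofList]
    rfl
  rw [PySem.List.foldl_congr_mem cell_set
      (fun s cell => PySem.Set.update s (get_neighbors cell w h nb))
      (fun s cell =>
        ((nb.map (fun ij => (cell.1 + ij.1, cell.2 + ij.2))).filter
          (fun n => is_in_matrix n w h)).foldl PySem.Set.add s)
      PySem.Set.empty
      (fun s cell _ => hA s cell),
    pv_outer, pv_foldl_flatMap]
  unfold pvCands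
  congr 1
  apply List.flatMap_congr
  intro c _
  rw [List.filter_filter]
  apply List.filter_congr
  intro n _
  ac_rfl

-- B's recursion equals the normal form (with the one-shot excluded-set predicate)
theorem pv_B_norm (w h : Int) (nb : List (Int × Int)) (ex : PySem.Set (Int × Int))
    (cells : List (Int × Int)) :
    pvExpand w h nb ex cells =
      (cells.flatMap (fun c =>
        (nb.map (fun ij => (c.1 + ij.1, c.2 + ij.2))).filter
          (fun n => decide (0 ≤ n.1 ∧ n.1 < w) && decide (0 ≤ n.2 ∧ n.2 < h) && !ex.contains n))).foldl
        PySem.Set.add PySem.Set.empty := by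
  induction cells using pvExpand.induct with
  | case1 => rw [pvExpand]; simp
  | case2 c =>
    rw [pvExpand]
    rw [pv_foldl_restrict nb (fun ij => (c.1 + ij.1, c.2 + ij.2))
      (fun n => decide (0 ≤ n.1 ∧ n.1 < w) && decide (0 ≤ n.2 ∧ n.2 < h) && !ex.contains n)]
    simp only [List.flatMap_cons, List.flatMap_nil, List.append_nil]
  | case3 c1 c2 rest chunkv midv ih1 ih2 =>
    rw [pvExpand]
    rw [ih1, ih2]
    have hu : ∀ (s : PySem.Set (Int × Int)) (L : List (Int × Int)),
        PySem.Set.union s (L.foldl PySem.Set.add PySem.Set.empty) = L.foldl PySem.Set.add s := by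
      intro s L
      show PySem.Set.update s (PySem.Set.ofList L) = _
      rw [pv_update_ofList]
      rfl
    rw [hu, ← List.foldl_append, ← List.flatMap_append, List.take_append_drop]

-- the two filter predicates agree once the excluded set is unfolded
theorem pv_pred_eq (cell_set pv : List (Int × Int)) (w h : Int) (n : Int × Int) :
    (decide (0 ≤ n.1 ∧ n.1 < w) && decide (0 ≤ n.2 ∧ n.2 < h) &&
        !(PySem.Set.update (PySem.Set.ofList cell_set) pv).contains n) =
      (is_in_matrix n w h && !decide (n ∈ cell_set) && !decide (n ∈ pv)) := by
  have hmemiff : n ∈ PySem.Set.update (PySem.Set.ofList cell_set) pv ↔ (n ∈ cell_set ∨ n ∈ pv) := by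
    rw [PySem.Set.mem_update, PySem.Set.mem_ofList]
  have hc : (PySem.Set.update (PySem.Set.ofList cell_set) pv).contains n =
      (decide (n ∈ cell_set) || decide (n ∈ pv)) := by
    cases hb : (PySem.Set.update (PySem.Set.ofList cell_set) pv).contains n
    · have hm : ¬ (n ∈ cell_set ∨ n ∈ pv) := fun hor => by
        have := (PySem.Set.contains_iff _ _).mpr (hmemiff.mpr hor)
        rw [hb] at this
        exact Bool.false_ne_true this
      simp [not_or] at hm
      simp [hm.1, hm.2]
    · have hm := hmemiff.mp ((PySem.Set.contains_iff _ _).mp hb)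
      rcases hm with h1 | h1 <;> simp [h1]
  rw [hc]
  simp only [is_in_matrix, Bool.and_assoc]
  cases hd : decide (n ∈ cell_set) <;> cases he : decide (n ∈ pv) <;> simp

theorem get_set_neighbors_eq_alt (cell_set : List (Int × Int)) (width height : Int)
    (neighborhood : List (Int × Int)) (previous_cell_set : Option (List (Int × Int))) :
    get_set_neighbors cell_set width height neighborhood previous_cell_set =
      get_set_neighbors_alt cell_set width height neighborhood previous_cell_set := by
  have key : ∀ pv : List (Int × Int),
      PySem.Set.diff (PySem.Set.diff
        (cell_set.foldl
          (fun s cell => PySem.Set.update s (get_neighbors cell width height neighborhood))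
          PySem.Set.empty) cell_set) pv =
      pvExpand width height neighborhood
        (PySem.Set.update (PySem.Set.ofList cell_set) pv) cell_set := by
    intro pv
    rw [pv_A_norm, pv_B_norm]
    unfold pvCands
    congr 1
    apply List.flatMap_congr
    intro c _
    apply List.filter_congr
    intro n _
    rw [pv_pred_eq]
  unfold get_set_neighbors get_set_neighbors_alt
  cases previous_cell_set with
  | none =>
    have hnil : ∀ s : PySem.Set (Int × Int), PySem.Set.diff s [] = s := by
      intro s; simp [PySem.Set.diff]
    have hup : PySem.Set.update (PySem.Set.ofList cell_set) ([] : List (Int × Int)) =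
        PySem.Set.ofList cell_set := rfl
    have := key []
    rw [hnil] at this
    simpa [hup] using this
  | some prev => exact key prev

-- ===== VERDICT (by name: the statement is the Claim_ definition above) =====
theorem get_set_neighbors_spec : Claim_equal_get_set_neighbors := by
  intro cs w h nb prev _
  exact get_set_neighbors_eq_alt cs w h nb prev
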